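-- pv_equiv track=rewrite | github.com/JerrinWiley/Lexical-and-Syntactical-Analysis | infint.py | limit_check
-- ===== SOURCE A (Python) =====
-- def limit_check(to_be_checked, function):
--     node = 4
--     input_length_limit = 40
--     output_length_limit = 100
--     length_limit = 0
--     if function == 'node':
--         if int(to_be_checked) > node:
--             return 'invalid expression'
--     else:
--         if function == 'input':
--             length_limit = input_length_limit
--         elif function == 'output':
--             length_limit = output_length_limit
--         # Length check
--         i = 0
--         while i < len(to_be_checked):
--             digit_length = 0
--             while i < len(to_be_checked) and to_be_checked[i].isdigit():
--                 digit_length += 1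
--                 i += 1
--                 if digit_length > length_limit:
--                     return 'invalid expression'
--             i += 1
--         return to_be_checked
-- ===== SOURCE B (Python) =====
-- def limit_check(to_be_checked, function):
--     # Window-existence check: a digit run longer than the limit exists iff some
--     # window of limit+1 consecutive characters consists entirely of digits.
--     if function == 'node':
--         return 'invalid expression' if int(to_be_checked) > 4 else None
--     length_limit = 40 if function == 'input' else 100 if function == 'output' else 0
--     window = length_limit + 1
--     for i in range(len(to_be_checked) - length_limit):
--         if all(ch.isdigit() for ch in to_be_checked[i:i + window]):
--             return 'invalid expression'
--     return to_be_checked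
-- ===== Notes on version B (the rewrite author's own statement) =====
-- stated objective: alternative
-- what changed: A walks the string with nested index loops counting each digit run as it goes; B never counts runs: it checks whether any window of limit+1 consecutive characters is all digits (a run exceeds the limit iff such a window exists), scanning fixed-size slices.
import Mathlib
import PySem

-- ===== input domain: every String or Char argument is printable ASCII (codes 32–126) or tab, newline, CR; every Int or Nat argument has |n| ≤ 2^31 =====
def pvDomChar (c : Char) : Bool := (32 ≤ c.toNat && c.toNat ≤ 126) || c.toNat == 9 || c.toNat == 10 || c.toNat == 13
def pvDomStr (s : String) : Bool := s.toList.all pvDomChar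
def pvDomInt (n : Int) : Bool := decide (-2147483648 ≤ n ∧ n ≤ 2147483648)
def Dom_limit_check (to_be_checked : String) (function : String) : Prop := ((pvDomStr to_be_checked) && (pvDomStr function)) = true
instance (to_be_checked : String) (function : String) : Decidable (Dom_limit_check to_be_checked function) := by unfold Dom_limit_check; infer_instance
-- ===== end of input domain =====

-- B replaces A's run-counting nested index loops by a window-existence check (a digit run
-- exceeds the limit iff some window of limit+1 consecutive characters is all digits);
-- objective: alternative algorithm of similar cost.

-- ===== PORT A =====
def pvAInner (limit : Int) (dl : Int) : List Char → Option (List Char)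
  | [] => some []
  | c :: cs =>
    if PySem.Chars.isdigit c then
      if dl + 1 > limit then none else pvAInner limit (dl + 1) cs
    else some (c :: cs)

theorem pvAInner_length_le (limit dl : Int) (cs rest : List Char)
    (h : pvAInner limit dl cs = some rest) : rest.length ≤ cs.length := by
  induction cs generalizing dl with
  | nil => simp [pvAInner] at h; simp [← h]
  | cons c cs ih =>
    by_cases hd : PySem.Chars.isdigit c
    · by_cases hl : dl + 1 > limit
      · simp [pvAInner, hd, hl] at h
      · simp [pvAInner, hd, hl] at h
        have := ih (dl + 1) h
        simp; omega
    · simp [pvAInner, hd] at h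
      simp [← h]

def pvAOuter (limit : Int) (t : String) : List Char → Option String
  | [] => some t
  | c :: cs =>
    match h : pvAInner limit 0 (c :: cs) with
    | none => some "invalid expression"
    | some rest => pvAOuter limit t (rest.drop 1)
  termination_by cs => cs.length
  decreasing_by
    have := pvAInner_length_le limit 0 (c :: cs) rest h
    simp at this ⊢; omega

def limit_check (to_be_checked : String) (function : String) : Option String :=
  let node : Int := 4
  let input_length_limit : Int := 40
  let output_length_limit : Int := 100
  let length_limit : Int := 0
  if function == "node" then
    match PySem.Int.ofStr? to_be_checked with
    | none => none   -- int() raises ValueError here; excluded by Pre_limit_check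
    | some n => if n > node then some "invalid expression" else none
  else
    let length_limit :=
      if function == "input" then input_length_limit
      else if function == "output" then output_length_limit
      else length_limit
    pvAOuter length_limit to_be_checked to_be_checked.toList

-- ===== PORT B =====
def limit_check_alt (to_be_checked : String) (function : String) : Option String :=
  if function == "node" then
    match PySem.Int.ofStr? to_be_checked with
    | none => none   -- int() raises ValueError here; excluded by Pre_limit_check
    | some n => if n > 4 then some "invalid expression" else none
  else
    let length_limit : Int :=
      if function == "input" then 40 else if function == "output" then 100 else 0
    let window := length_limit + 1
    let cs := to_be_checked.toList
    if (PySem.List.pyRange 0 ((cs.length : Int) - length_limit) 1).any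
        (fun i => (PySem.List.slice cs (some i) (some (i + window))).all
          (fun ch => PySem.Chars.isdigit ch))
    then some "invalid expression" else some to_be_checked

-- ===== PRECONDITION & SPEC =====
-- Pre_ excludes exactly the inputs where function == 'node' and int(to_be_checked) raises
-- ValueError; both A and B raise there.
def Pre_limit_check (to_be_checked : String) (function : String) : Prop :=
  function = "node" → (PySem.Int.ofStr? to_be_checked).isSome = true
instance (to_be_checked : String) (function : String) : Decidable (Pre_limit_check to_be_checked function) := by unfold Pre_limit_check; infer_instance
def pvWitness_limit_check : String × String := ("3", "node")

def Spec_limit_check (to_be_checked : String) (function : String) (out : Option String) : Prop := out = limit_check_alt to_be_checked function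
instance (to_be_checked : String) (function : String) (out : Option String) : Decidable (Spec_limit_check to_be_checked function out) := by unfold Spec_limit_check; infer_instance

-- ===== CLAIM (what is proved, stated in full; the proofs are below) =====
def Claim_equal_limit_check : Prop := ∀ (to_be_checked : String) (function : String), Dom_limit_check to_be_checked function → Pre_limit_check to_be_checked function → Spec_limit_check to_be_checked function (limit_check to_be_checked function)

-- ===== LEMMAS AND PROOFS =====

def pvLead (cs : List Char) : Int := ((cs.takeWhile (fun c => PySem.Chars.isdigit c)).length : Int)

theorem pvLead_nonneg (cs : List Char) : 0 ≤ pvLead cs := by simp [pvLead]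

theorem pvLead_le_length (cs : List Char) : pvLead cs ≤ (cs.length : Int) := by
  simp only [pvLead, Nat.cast_le]
  exact (List.takeWhile_sublist _).length_le

theorem pvAInner_eq (limit : Int) (cs : List Char) (dl : Int) (h : dl ≤ limit) :
    pvAInner limit dl cs =
      if limit < dl + pvLead cs then none
      else some (cs.dropWhile (fun c => PySem.Chars.isdigit c)) := by
  induction cs generalizing dl with
  | nil => simp [pvAInner, pvLead]; omega
  | cons c cs ih =>
    by_cases hd : PySem.Chars.isdigit c
    · have hlead : pvLead (c :: cs) = pvLead cs + 1 := by simp [pvLead, hd]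
      have hdw : (c :: cs).dropWhile (fun c => PySem.Chars.isdigit c)
          = cs.dropWhile (fun c => PySem.Chars.isdigit c) := by simp [hd]
      by_cases hl : dl + 1 > limit
      · have := pvLead_nonneg cs
        rw [show pvAInner limit dl (c :: cs) = none by simp [pvAInner, hd, hl],
          if_pos (by omega)]
      · rw [show pvAInner limit dl (c :: cs) = pvAInner limit (dl + 1) cs by simp [pvAInner, hd, hl],
          ih (dl + 1) (by omega), hlead, hdw]
        rw [show dl + 1 + pvLead cs = dl + (pvLead cs + 1) by ring]
    · have hlead : pvLead (c :: cs) = 0 := by simp [pvLead, hd]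
      rw [show pvAInner limit dl (c :: cs) = some (c :: cs) by simp [pvAInner, hd],
        hlead, if_neg (by omega)]
      simp [hd]

def pvMaxRun : Int → List Char → Int
  | run, [] => run
  | run, c :: cs => if PySem.Chars.isdigit c then pvMaxRun (run + 1) cs else max run (pvMaxRun 0 cs)

theorem pvMaxRun_ge (cs : List Char) (run : Int) : run ≤ pvMaxRun run cs := by
  induction cs generalizing run with
  | nil => simp [pvMaxRun]
  | cons c cs ih =>
    by_cases hd : PySem.Chars.isdigit c
    · simp only [pvMaxRun, hd, if_true]; have := ih (run + 1); omega
    · simp [pvMaxRun, hd]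

theorem pvMaxRun_decomp (cs : List Char) (run : Int) (h : 0 ≤ run) :
    pvMaxRun run cs =
      max (run + pvLead cs)
        (pvMaxRun 0 ((cs.dropWhile (fun c => PySem.Chars.isdigit c)).drop 1)) := by
  induction cs generalizing run with
  | nil => simp [pvMaxRun, pvLead]; omega
  | cons c cs ih =>
    by_cases hd : PySem.Chars.isdigit c
    · have hlead : pvLead (c :: cs) = pvLead cs + 1 := by simp [pvLead, hd]
      have hdw : (c :: cs).dropWhile (fun c => PySem.Chars.isdigit c)
          = cs.dropWhile (fun c => PySem.Chars.isdigit c) := by simp [hd]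
      rw [show pvMaxRun run (c :: cs) = pvMaxRun (run + 1) cs by simp [pvMaxRun, hd],
        ih (run + 1) (by omega), hlead, hdw,
        show run + 1 + pvLead cs = run + (pvLead cs + 1) by ring]
    · have hlead : pvLead (c :: cs) = 0 := by simp [pvLead, hd]
      rw [show pvMaxRun run (c :: cs) = max run (pvMaxRun 0 cs) by simp [pvMaxRun, hd], hlead]
      have hdw : (c :: cs).dropWhile (fun c => PySem.Chars.isdigit c) = c :: cs := by
        simp [hd]
      rw [hdw]
      simp

-- step decomposition: the longest run of c :: cs is the leading run or the longest run of cs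
theorem pvMaxRun_cons (c : Char) (cs : List Char) :
    pvMaxRun 0 (c :: cs) = max (pvLead (c :: cs)) (pvMaxRun 0 cs) := by
  by_cases hd : PySem.Chars.isdigit c
  · have hlead : pvLead (c :: cs) = pvLead cs + 1 := by simp [pvLead, hd]
    have hdw : (c :: cs).dropWhile (fun c => PySem.Chars.isdigit c)
        = cs.dropWhile (fun c => PySem.Chars.isdigit c) := by simp [hd]
    have h1 := pvMaxRun_decomp (c :: cs) 0 le_rfl
    have h2 := pvMaxRun_decomp cs 0 le_rfl
    rw [hdw] at h1
    rw [hlead] at h1 ⊢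
    omega
  · have hlead : pvLead (c :: cs) = 0 := by simp [pvLead, hd]
    have hge := pvMaxRun_ge cs 0
    rw [show pvMaxRun 0 (c :: cs) = max 0 (pvMaxRun 0 cs) by simp [pvMaxRun, hd], hlead]

-- the longest run exceeds L iff some suffix starts with more than L digits
theorem pvMaxRun_lt_iff (cs : List Char) (L : Int) :
    L < pvMaxRun 0 cs ↔ ∃ j : Nat, L < pvLead (cs.drop j) := by
  induction cs with
  | nil =>
    constructor
    · intro h; exact ⟨0, by simpa [pvMaxRun] using h⟩
    · rintro ⟨j, hj⟩; simpa [pvMaxRun, pvLead] using hj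
  | cons c cs ih =>
    rw [pvMaxRun_cons]
    constructor
    · intro h
      rcases lt_max_iff.mp h with h' | h'
      · exact ⟨0, by simpa using h'⟩
      · rcases ih.mp h' with ⟨j, hj⟩
        exact ⟨j + 1, by simpa using hj⟩
    · rintro ⟨j, hj⟩
      match j with
      | 0 => exact lt_max_iff.mpr (Or.inl (by simpa using hj))
      | j + 1 => exact lt_max_iff.mpr (Or.inr (ih.mpr ⟨j, by simpa using hj⟩))

-- k consecutive digits at the front ↔ the string is long enough and its k-prefix is all digits
theorem pvLead_ge_iff (xs : List Char) (k : Nat) :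
    (k : Int) ≤ pvLead xs ↔ k ≤ xs.length ∧ (xs.take k).all (fun c => PySem.Chars.isdigit c) := by
  simp only [pvLead, Nat.cast_le]
  induction xs generalizing k with
  | nil => cases k <;> simp
  | cons c cs ih =>
    cases k with
    | zero => simp
    | succ k =>
      by_cases hd : PySem.Chars.isdigit c
      · simp [hd, ih]
      · simp [hd]

theorem pvAOuter_cons_none (limit : Int) (t : String) (c : Char) (cs : List Char)
    (h : pvAInner limit 0 (c :: cs) = none) :
    pvAOuter limit t (c :: cs) = some "invalid expression" := by
  rw [pvAOuter, h]

theorem pvAOuter_cons_some (limit : Int) (t : String) (c : Char) (cs X : List Char)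
    (h : pvAInner limit 0 (c :: cs) = some X) :
    pvAOuter limit t (c :: cs) = pvAOuter limit t (X.drop 1) := by
  rw [pvAOuter, h]

theorem pvAOuter_eq (limit : Int) (t : String) (cs : List Char) (hl : 0 ≤ limit) :
    pvAOuter limit t cs =
      if limit < pvMaxRun 0 cs then some "invalid expression" else some t := by
  induction hn : cs.length using Nat.strong_induction_on generalizing cs with
  | _ n ih =>
    match cs with
    | [] => rw [pvAOuter, if_neg (by simp [pvMaxRun]; omega)]
    | c :: cs' =>
      have hinner := pvAInner_eq limit (c :: cs') 0 hl
      have hdec := pvMaxRun_decomp (c :: cs') 0 le_rfl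
      have hmge := pvMaxRun_ge (((c :: cs').dropWhile (fun c => PySem.Chars.isdigit c)).drop 1) (0 : Int)
      have hlnn := pvLead_nonneg (c :: cs')
      by_cases hbad : limit < pvLead (c :: cs')
      · rw [if_pos (by simp at hbad ⊢; omega)] at hinner
        rw [pvAOuter_cons_none limit t c cs' hinner, if_pos (by omega)]
      · rw [if_neg (by simp at hbad ⊢; omega)] at hinner
        rw [pvAOuter_cons_some limit t c cs' _ hinner]
        have hlen : (((c :: cs').dropWhile (fun c => PySem.Chars.isdigit c)).drop 1).length < n := by
          have h1 : ((c :: cs').dropWhile (fun c => PySem.Chars.isdigit c)).length ≤ (c :: cs').length :=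
            List.length_dropWhile_le _ _
          rw [List.length_drop]
          simp only [List.length_cons] at h1 hn
          omega
        rw [ih _ hlen _ rfl]
        rcases max_cases (0 + pvLead (c :: cs'))
            (pvMaxRun 0 ((List.dropWhile (fun c => PySem.Chars.isdigit c) (c :: cs')).drop 1)) with
          ⟨he, hle⟩ | ⟨he, hle⟩ <;> rw [he] at hdec
        · have : (limit < pvMaxRun 0 ((List.dropWhile (fun c => PySem.Chars.isdigit c) (c :: cs')).drop 1))
              = (limit < pvMaxRun 0 (c :: cs')) := propext (by omega)
          simp only [this]
        · have : (limit < pvMaxRun 0 ((List.dropWhile (fun c => PySem.Chars.isdigit c) (c :: cs')).drop 1))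
              = (limit < pvMaxRun 0 (c :: cs')) := propext (by omega)
          simp only [this]

-- B's window test fires iff the longest digit run exceeds L (for 0 ≤ L)
theorem pvWindow_iff (cs : List Char) (L : Int) (hL : 0 ≤ L) :
    ((PySem.List.pyRange 0 ((cs.length : Int) - L) 1).any
        (fun i => (PySem.List.slice cs (some i) (some (i + (L + 1)))).all
          (fun ch => PySem.Chars.isdigit ch)) = true)
      ↔ L < pvMaxRun 0 cs := by
  rw [List.any_eq_true, pvMaxRun_lt_iff]
  constructor
  · rintro ⟨i, hmem, hall⟩
    rw [PySem.List.mem_pyRange_one] at hmem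
    obtain ⟨h0, hlt⟩ := hmem
    refine ⟨i.toNat, ?_⟩
    have hi : (i.toNat : Int) = i := Int.toNat_of_nonneg h0
    rw [← hi] at hall
    rw [show ((i.toNat : Int) + (L + 1)) = (i.toNat : Int) + ((L.toNat + 1 : Nat) : Int) by
      push_cast; omega] at hall
    rw [PySem.List.slice_natCast_add] at hall
    have hlen : (L.toNat + 1) ≤ (cs.drop i.toNat).length := by
      rw [List.length_drop]; omega
    rw [show (cs.drop i.toNat).take (L.toNat + 1)
        = ((cs.drop i.toNat).take (L.toNat + 1)).take (L.toNat + 1) by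
      rw [List.take_take]; simp] at hall
    have : ((L.toNat + 1 : Nat) : Int) ≤ pvLead (cs.drop i.toNat) := by
      rw [pvLead_ge_iff]
      refine ⟨hlen, ?_⟩
      rw [List.take_take] at hall
      simpa using hall
    omega
  · rintro ⟨j, hj⟩
    have hlead_le := pvLead_le_length (cs.drop j)
    rw [List.length_drop] at hlead_le
    have hk : ((L.toNat + 1 : Nat) : Int) ≤ pvLead (cs.drop j) := by push_cast; omega
    rw [pvLead_ge_iff] at hk
    obtain ⟨hlen, hall⟩ := hk
    refine ⟨(j : Int), ?_, ?_⟩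
    · rw [PySem.List.mem_pyRange_one]
      constructor
      · positivity
      · -- lead(drop j) ≤ length cs - j forces j + L + 1 ≤ length cs
        have hjle : j ≤ cs.length := by
          by_contra h
          push Not at h
          rw [List.length_drop] at hlen
          omega
        rw [List.length_drop] at hlen
        omega
    · have hk : ((j : Int) + (L + 1)) = (j : Int) + ((L.toNat + 1 : Nat) : Int) := by
        push_cast; omega
      rw [hk, PySem.List.slice_natCast_add]
      exact hall

-- ===== VERDICT (by name: the statement is the Claim_ definition above) =====
theorem limit_check_spec : Claim_equal_limit_check := by
  intro t f _ _
  show limit_check t f = limit_check_alt t f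
  by_cases hnode : f = "node"
  · subst hnode; rfl
  · have hb : (f == "node") = false := by simp [hnode]
    simp only [limit_check, limit_check_alt, hb, Bool.false_eq_true, if_false]
    set L : Int := if f == "input" then (40 : Int) else if f == "output" then 100 else 0 with hLdef
    have hl : (0 : Int) ≤ L := by
      rw [hLdef]; split
      · omega
      · split <;> omega
    rw [pvAOuter_eq L t t.toList hl]
    by_cases hrun : L < pvMaxRun 0 t.toList
    · rw [if_pos hrun, if_pos ((pvWindow_iff t.toList L hl).mpr hrun)]
    · rw [if_neg hrun]
      rw [if_neg (fun h => hrun ((pvWindow_iff t.toList L hl).mp h))]
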